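-- pv_equiv track=rewrite | github.com/aryanshygun/Quera-Python-Beginner | Introduction to Python Programming/Finished Questions/صه صفر.py | binn
-- ===== SOURCE A (Python) =====
-- def binn(n):
--
--     xlist = []
--     for i in range(2**n):
--         xlist.append(bin(i)[2:].zfill(n))
--
--     x = 0
--     for i in xlist:
--         if '000' in i:
--             continue
--         else:
--             x += 1
--     return x
-- ===== SOURCE B (Python) =====
-- def binn(n):
--     # Count n-bit binary strings containing no "000": linear DP over the
--     # length of the current leading/trailing zero run (tribonacci recurrence).
--     e0, e1, e2 = 1, 0, 0
--     for _ in range(n):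
--         e0, e1, e2 = e0 + e1 + e2, e0, e1
--     return e0 + e1 + e2
-- ===== Notes on version B (the rewrite author's own statement) =====
-- stated objective: faster
-- what changed: Replaces enumerating all 2^n binary strings and scanning each for '000' with a linear dynamic program over the zero-run-length state (tribonacci-like recurrence).
import Mathlib
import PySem

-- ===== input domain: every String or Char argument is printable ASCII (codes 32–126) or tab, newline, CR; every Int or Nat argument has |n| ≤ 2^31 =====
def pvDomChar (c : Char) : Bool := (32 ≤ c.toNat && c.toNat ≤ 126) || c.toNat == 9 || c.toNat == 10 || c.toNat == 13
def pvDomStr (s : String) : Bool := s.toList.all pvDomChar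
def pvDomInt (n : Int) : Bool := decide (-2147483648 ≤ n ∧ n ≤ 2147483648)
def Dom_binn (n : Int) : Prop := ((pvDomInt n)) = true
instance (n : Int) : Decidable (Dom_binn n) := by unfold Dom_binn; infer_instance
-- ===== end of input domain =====

-- B replaces A's enumeration of all 2^n bit strings (scanning each for "000")
-- by a linear dynamic program over the leading-zero-run-length state; same value on all n ≥ 0.

-- ===== PORT A =====

-- Python's substring test `'000' in i`, exact on List Char: true iff some
-- window of three consecutive characters is '0','0','0'.
def pvIn000 : List Char → Bool
  | c1 :: c2 :: c3 :: rest =>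
      (c1 == '0' && c2 == '0' && c3 == '0') || pvIn000 (c2 :: c3 :: rest)
  | _ => false

-- bin(i)[2:] for i > 0: most-significant-bit-first binary digits, [] for 0.
def pvNatBits (i : Nat) : List Char :=
  if h : i = 0 then []
  else pvNatBits (i / 2) ++ [if i % 2 = 1 then '1' else '0']
decreasing_by exact Nat.div_lt_self (Nat.pos_of_ne_zero h) (by norm_num)

-- bin(i)[2:] exactly (Python prints 0 as "0").
def pvPyBin (i : Nat) : List Char := if i = 0 then ['0'] else pvNatBits i

-- str.zfill(m): left-pad with '0' to length m (no sign occurs here: digits only).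
def pvZfill (m : Nat) (s : List Char) : List Char :=
  List.replicate (m - s.length) '0' ++ s

-- Transliteration of A: build xlist over range(2**n), then count entries
-- without '000'.  (For n < 0 Python's range(2**n) raises TypeError: Pre_ excludes n < 0.)
def binn (n : Int) : Int :=
  let xlist := (List.range (2 ^ n.toNat)).map (fun i => pvZfill n.toNat (pvPyBin i))
  xlist.foldl (fun x s => if pvIn000 s then x else x + 1) 0

-- ===== PORT B =====
-- Transliteration of Source B: fold the tribonacci-like DP step over range(n).
def binn_alt (n : Int) : Int :=
  let st := (List.range n.toNat).foldl
    (fun (st : Int × Int × Int) _ => (st.1 + st.2.1 + st.2.2, st.1, st.2.1)) (1, 0, 0)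
  st.1 + st.2.1 + st.2.2

-- ===== PRECONDITION & SPEC =====
-- Pre_ excludes n < 0, where A raises TypeError (2**n is a float, range rejects it).
def Pre_binn (n : Int) : Prop := 0 ≤ n
instance (n : Int) : Decidable (Pre_binn n) := by unfold Pre_binn; infer_instance
def pvWitness_binn : Int := 3

def Spec_binn (n : Int) (out : Int) : Prop := out = binn_alt n
instance (n : Int) (out : Int) : Decidable (Spec_binn n out) := by unfold Spec_binn; infer_instance

-- ===== CLAIM (what is proved, stated in full; the proofs are below) =====
def Claim_equal_binn : Prop := ∀ (n : Int), Dom_binn n → Pre_binn n → Spec_binn n (binn n)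

-- ===== LEMMAS AND PROOFS =====

-- The m low-order bits of i, most significant first.
def pvBits : Nat → Nat → List Char
  | 0, _ => []
  | m + 1, i => pvBits m (i / 2) ++ [if i % 2 = 1 then '1' else '0']

-- leading-zero-run length
def pvLzc (s : List Char) : Nat := (s.takeWhile (· == '0')).length

theorem pvNatBits_pos {i : Nat} (h : i ≠ 0) :
    pvNatBits i = pvNatBits (i / 2) ++ [if i % 2 = 1 then '1' else '0'] := by
  rw [pvNatBits]; simp [h]

theorem pvNatBits_zero : pvNatBits 0 = [] := by
  rw [pvNatBits]; simp

theorem pvBits_zero (m : Nat) : pvBits m 0 = List.replicate m '0' := by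
  induction m with
  | zero => simp [pvBits]
  | succ m ih => simp [pvBits, ih, ← List.replicate_succ']

theorem pvBits_zfill : ∀ (m i : Nat), i < 2 ^ m →
    pvBits m i = pvZfill m (pvNatBits i) := by
  intro m
  induction m with
  | zero =>
      intro i hi
      interval_cases i
      simp [pvBits, pvZfill, pvNatBits_zero]
  | succ m ih =>
      intro i hi
      have hdiv : i / 2 < 2 ^ m := by
        rw [Nat.div_lt_iff_lt_mul (by norm_num)]
        calc i < 2 ^ (m + 1) := hi
        _ = 2 ^ m * 2 := by ring
      by_cases h0 : i = 0
      · subst h0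
        simp [pvBits_zero, pvNatBits_zero, pvZfill]
      · simp only [pvBits, ih _ hdiv, pvZfill, pvNatBits_pos h0,
          List.length_append, List.length_singleton]
        rw [show m - (pvNatBits (i / 2)).length
              = m + 1 - ((pvNatBits (i / 2)).length + 1) by omega]
        simp [List.append_assoc]

theorem pvZfill_pyBin {m i : Nat} (hm : 1 ≤ m) (hi : i < 2 ^ m) :
    pvZfill m (pvPyBin i) = pvBits m i := by
  by_cases h0 : i = 0
  · subst h0
    rw [pvBits_zfill m 0 hi, pvNatBits_zero]
    simp only [pvPyBin, if_pos rfl, pvZfill, List.length_singleton, List.length_nil,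
      List.append_nil, Nat.sub_zero]
    rw [show m = (m - 1) + 1 by omega, List.replicate_succ']
    simp
  · rw [pvBits_zfill m i hi]
    simp [pvPyBin, h0]

theorem pvLzc_cons_zero (s : List Char) : pvLzc ('0' :: s) = pvLzc s + 1 := by
  simp [pvLzc, List.takeWhile_cons]
theorem pvLzc_cons_one (s : List Char) : pvLzc ('1' :: s) = 0 := by
  simp [pvLzc, List.takeWhile_cons]

theorem pvIn000_cons_one (s : List Char) : pvIn000 ('1' :: s) = pvIn000 s := by
  match s with
  | [] => simp [pvIn000]
  | [a] => simp [pvIn000]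
  | a :: b :: t => simp [pvIn000]

theorem pvIn000_cons_zero (s : List Char) :
    pvIn000 ('0' :: s) = (decide (2 ≤ pvLzc s) || pvIn000 s) := by
  match s with
  | [] => simp [pvIn000, pvLzc]
  | [a] =>
      by_cases ha : a = '0' <;>
        simp [pvIn000, pvLzc, List.takeWhile_cons, ha]
  | a :: b :: t =>
      by_cases ha : a = '0' <;> by_cases hb : b = '0' <;>
        simp [pvIn000, pvLzc, List.takeWhile_cons, ha, hb]

theorem pvLzc_le_of_good {s : List Char} (h : pvIn000 s = false) : pvLzc s ≤ 2 := by
  match s with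
  | [] => simp [pvLzc]
  | [a] =>
      by_cases ha : a = '0' <;> simp [pvLzc, List.takeWhile_cons, ha]
  | [a, b] =>
      by_cases ha : a = '0' <;> by_cases hb : b = '0' <;>
        simp [pvLzc, List.takeWhile_cons, ha, hb]
  | a :: b :: c :: t =>
      by_cases ha : a = '0' <;> by_cases hb : b = '0' <;> by_cases hc : c = '0'
      · exfalso; simp [pvIn000, ha, hb, hc] at h
      all_goals simp [pvLzc, List.takeWhile_cons, ha, hb, hc]

theorem pvBits_lo : ∀ (m i : Nat), i < 2 ^ m → pvBits (m + 1) i = '0' :: pvBits m i := by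
  intro m
  induction m with
  | zero => intro i hi; interval_cases i; simp [pvBits]
  | succ m ih =>
      intro i hi
      have hdiv : i / 2 < 2 ^ m := by
        rw [Nat.div_lt_iff_lt_mul (by norm_num)]
        calc i < 2 ^ (m + 1) := hi
        _ = 2 ^ m * 2 := by ring
      show pvBits (m + 1) (i / 2) ++ _ = '0' :: (pvBits m (i / 2) ++ _)
      rw [ih _ hdiv]
      simp

theorem pvBits_hi : ∀ (m i : Nat), i < 2 ^ m →
    pvBits (m + 1) (2 ^ m + i) = '1' :: pvBits m i := by
  intro m
  induction m with
  | zero => intro i hi; interval_cases i; simp [pvBits]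
  | succ m ih =>
      intro i hi
      have hdiv : i / 2 < 2 ^ m := by
        rw [Nat.div_lt_iff_lt_mul (by norm_num)]
        calc i < 2 ^ (m + 1) := hi
        _ = 2 ^ m * 2 := by ring
      have hq : (2 ^ (m + 1) + i) / 2 = 2 ^ m + i / 2 := by
        rw [pow_succ, mul_comm]
        omega
      have hr : (2 ^ (m + 1) + i) % 2 = i % 2 := by
        rw [pow_succ, mul_comm]
        omega
      show pvBits (m + 1) ((2 ^ (m + 1) + i) / 2) ++ _ = _
      rw [hq, hr, ih _ hdiv]
      simp [pvBits]

-- counts of good (no-"000") m-bit strings with leading-zero run exactly k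
def pvCnt (m k : Nat) : Nat :=
  (List.range (2 ^ m)).countP
    (fun i => !pvIn000 (pvBits m i) && pvLzc (pvBits m i) == k)

def pvTot (m : Nat) : Nat :=
  (List.range (2 ^ m)).countP (fun i => !pvIn000 (pvBits m i))

theorem countP_split {α : Type} (l : List α) (p q : α → Bool) :
    l.countP p = l.countP (fun a => p a && q a) + l.countP (fun a => p a && !q a) := by
  induction l with
  | nil => simp
  | cons a t ih =>
      by_cases hp : p a <;> by_cases hq : q a <;>
        simp [List.countP_cons, hp, hq, ih] <;> omega

theorem pvTot_eq (m : Nat) : pvTot m = pvCnt m 0 + pvCnt m 1 + pvCnt m 2 := by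
  have h1 : pvTot m
      = (List.range (2 ^ m)).countP
          (fun a => !pvIn000 (pvBits m a) && (pvLzc (pvBits m a) == 0))
        + (List.range (2 ^ m)).countP
          (fun a => !pvIn000 (pvBits m a) && !(pvLzc (pvBits m a) == 0)) :=
    countP_split _ _ _
  have h2 : (List.range (2 ^ m)).countP
          (fun a => !pvIn000 (pvBits m a) && !(pvLzc (pvBits m a) == 0))
      = (List.range (2 ^ m)).countP
          (fun a => (!pvIn000 (pvBits m a) && !(pvLzc (pvBits m a) == 0))
            && (pvLzc (pvBits m a) == 1))
        + (List.range (2 ^ m)).countP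
          (fun a => (!pvIn000 (pvBits m a) && !(pvLzc (pvBits m a) == 0))
            && !(pvLzc (pvBits m a) == 1)) :=
    countP_split _ _ _
  have e1 : (List.range (2 ^ m)).countP
      (fun a => (!pvIn000 (pvBits m a) && !(pvLzc (pvBits m a) == 0))
        && (pvLzc (pvBits m a) == 1)) = pvCnt m 1 := by
    apply List.countP_congr
    intro i _
    by_cases hg : pvIn000 (pvBits m i) = true <;> simp [hg] <;> omega
  have e2 : (List.range (2 ^ m)).countP
      (fun a => (!pvIn000 (pvBits m a) && !(pvLzc (pvBits m a) == 0))
        && !(pvLzc (pvBits m a) == 1)) = pvCnt m 2 := by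
    apply List.countP_congr
    intro i _
    by_cases hg : pvIn000 (pvBits m i) = true <;> simp [hg]
    have := pvLzc_le_of_good (by simpa using hg)
    omega
  unfold pvCnt at *
  unfold pvTot at *
  omega

theorem range_pow_succ (m : Nat) :
    List.range (2 ^ (m + 1)) = List.range (2 ^ m) ++ (List.range (2 ^ m)).map (fun i => 2 ^ m + i) := by
  rw [show 2 ^ (m + 1) = 2 ^ m + 2 ^ m by ring, List.range_add]

theorem pvCnt_succ_0 (m : Nat) : pvCnt (m + 1) 0 = pvTot m := by
  unfold pvCnt pvTot
  rw [range_pow_succ, List.countP_append, List.countP_map]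
  have hl : (List.range (2 ^ m)).countP
      (fun i => !pvIn000 (pvBits (m + 1) i) && pvLzc (pvBits (m + 1) i) == 0) = 0 := by
    rw [List.countP_eq_zero]
    intro i hi
    rw [pvBits_lo m i (List.mem_range.mp hi)]
    simp [pvLzc_cons_zero]
  have hr : (List.range (2 ^ m)).countP
      ((fun i => !pvIn000 (pvBits (m + 1) i) && pvLzc (pvBits (m + 1) i) == 0) ∘ (fun i => 2 ^ m + i))
      = (List.range (2 ^ m)).countP (fun i => !pvIn000 (pvBits m i)) := by
    apply List.countP_congr
    intro i hi
    simp only [Function.comp_apply, pvBits_hi m i (List.mem_range.mp hi),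
      pvIn000_cons_one, pvLzc_cons_one]
    simp
  rw [hl, hr]; omega

theorem pvCnt_succ_1 (m : Nat) : pvCnt (m + 1) 1 = pvCnt m 0 := by
  unfold pvCnt
  rw [range_pow_succ, List.countP_append, List.countP_map]
  have hr : (List.range (2 ^ m)).countP
      ((fun i => !pvIn000 (pvBits (m + 1) i) && pvLzc (pvBits (m + 1) i) == 1) ∘ (fun i => 2 ^ m + i))
      = 0 := by
    rw [List.countP_eq_zero]
    intro i hi
    rw [Function.comp_apply, pvBits_hi m i (List.mem_range.mp hi)]
    simp [pvLzc_cons_one]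
  have hl : (List.range (2 ^ m)).countP
      (fun i => !pvIn000 (pvBits (m + 1) i) && pvLzc (pvBits (m + 1) i) == 1)
      = (List.range (2 ^ m)).countP
      (fun i => !pvIn000 (pvBits m i) && pvLzc (pvBits m i) == 0) := by
    apply List.countP_congr
    intro i hi
    rw [pvBits_lo m i (List.mem_range.mp hi), pvIn000_cons_zero, pvLzc_cons_zero]
    by_cases hg : pvIn000 (pvBits m i) = true <;> simp [hg] <;> omega
  rw [hl, hr]; omega

theorem pvCnt_succ_2 (m : Nat) : pvCnt (m + 1) 2 = pvCnt m 1 := by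
  unfold pvCnt
  rw [range_pow_succ, List.countP_append, List.countP_map]
  have hr : (List.range (2 ^ m)).countP
      ((fun i => !pvIn000 (pvBits (m + 1) i) && pvLzc (pvBits (m + 1) i) == 2) ∘ (fun i => 2 ^ m + i))
      = 0 := by
    rw [List.countP_eq_zero]
    intro i hi
    rw [Function.comp_apply, pvBits_hi m i (List.mem_range.mp hi)]
    simp [pvLzc_cons_one]
  have hl : (List.range (2 ^ m)).countP
      (fun i => !pvIn000 (pvBits (m + 1) i) && pvLzc (pvBits (m + 1) i) == 2)
      = (List.range (2 ^ m)).countP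
      (fun i => !pvIn000 (pvBits m i) && pvLzc (pvBits m i) == 1) := by
    apply List.countP_congr
    intro i hi
    rw [pvBits_lo m i (List.mem_range.mp hi), pvIn000_cons_zero, pvLzc_cons_zero]
    by_cases hg : pvIn000 (pvBits m i) = true <;> simp [hg] <;> omega
  rw [hl, hr]; omega

-- B's fold state after m steps is exactly (pvCnt m 0, pvCnt m 1, pvCnt m 2).
theorem fold_state (m : Nat) :
    (List.range m).foldl
      (fun (st : Int × Int × Int) _ => (st.1 + st.2.1 + st.2.2, st.1, st.2.1)) (1, 0, 0)
    = ((pvCnt m 0 : Int), (pvCnt m 1 : Int), (pvCnt m 2 : Int)) := by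
  induction m with
  | zero => decide
  | succ m ih =>
      rw [List.range_succ, List.foldl_append, ih]
      simp only [List.foldl_cons, List.foldl_nil, pvCnt_succ_0, pvCnt_succ_1, pvCnt_succ_2,
        pvTot_eq]
      push_cast
      ring_nf

-- A's counting loop is countP of "no '000'".
theorem foldl_count (l : List (List Char)) (x : Int) :
    l.foldl (fun x s => if pvIn000 s then x else x + 1) x
      = x + l.countP (fun s => !pvIn000 s) := by
  induction l generalizing x with
  | nil => simp
  | cons a t ih =>
      by_cases h : pvIn000 a <;> simp [List.countP_cons, h, ih] <;> push_cast <;> ring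

theorem binn_eq_tot {n : Int} (hm : 1 ≤ n.toNat) : binn n = (pvTot n.toNat : Int) := by
  unfold binn pvTot
  rw [foldl_count, List.countP_map]
  have : (List.range (2 ^ n.toNat)).countP
      ((fun s => !pvIn000 s) ∘ fun i => pvZfill n.toNat (pvPyBin i))
      = (List.range (2 ^ n.toNat)).countP (fun i => !pvIn000 (pvBits n.toNat i)) := by
    apply List.countP_congr
    intro i hi
    rw [Function.comp_apply, pvZfill_pyBin hm (List.mem_range.mp hi)]
  rw [this]; ring

-- ===== VERDICT (by name: the statement is the Claim_ definition above) =====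
theorem binn_spec : Claim_equal_binn := by
  intro n _ hpre
  unfold Spec_binn binn_alt
  rw [fold_state]
  by_cases h0 : n.toNat = 0
  · have hn : n = 0 := by
      have := Int.toNat_of_nonneg hpre
      omega
    subst hn
    decide
  · rw [binn_eq_tot (by omega), pvTot_eq]
    push_cast
    ring
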